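-- pv_equiv track=rewrite | github.com/suryansh4424/aegis_crypto | crypto_algorithms/polybius.py | decrypt_polybius
-- ===== SOURCE A (Python) =====
-- def create_polybius_square():
--     square = {}
--     alphabet = "ABCDEFGHIKLMNOPQRSTUVWXYZ"  # J is omitted
--     for i in range(5):
--         for j in range(5):
--             square[alphabet[i * 5 + j]] = f"{i + 1}{j + 1}"
--     return square
--
-- def decrypt_polybius(ciphertext: str) -> str:
--     square = create_polybius_square()
--     reverse_square = {v: k for k, v in square.items()}
--     plaintext = ""
--
--     for i in range(0, len(ciphertext), 2):
--         pair = ciphertext[i:i + 2]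
--         if pair in reverse_square:
--             plaintext += reverse_square[pair]
--
--     return plaintext
-- ===== SOURCE B (Python) =====
-- def decrypt_polybius(ciphertext: str) -> str:
--     # Streaming two-state automaton: one character at a time, no slicing and no
--     # lookup tables; a pending row value is carried across characters and a
--     # letter is emitted by arithmetic indexing when a valid pair completes.
--     alphabet = "ABCDEFGHIKLMNOPQRSTUVWXYZ"
--     out = []
--     pending = False
--     row = 0
--     for ch in ciphertext:
--         d = ord(ch) - 49  # '1' -> 0 ... '5' -> 4
--         if not pending:
--             row = d
--             pending = True
--         else:
--             if 0 <= row <= 4 and 0 <= d <= 4: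
--                 out.append(alphabet[row * 5 + d])
--             pending = False
--     return ''.join(out)
-- ===== Notes on version B (the rewrite author's own statement) =====
-- stated objective: alternative
-- what changed: B replaces A's staged design (build the Polybius dict, reverse it, slice the ciphertext into 2-char substrings and look each up) with a single-pass character-at-a-time finite automaton that carries a pending row value and emits each letter by closed-form arithmetic indexing into the alphabet, building no tables and taking no slices.
import Mathlib
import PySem

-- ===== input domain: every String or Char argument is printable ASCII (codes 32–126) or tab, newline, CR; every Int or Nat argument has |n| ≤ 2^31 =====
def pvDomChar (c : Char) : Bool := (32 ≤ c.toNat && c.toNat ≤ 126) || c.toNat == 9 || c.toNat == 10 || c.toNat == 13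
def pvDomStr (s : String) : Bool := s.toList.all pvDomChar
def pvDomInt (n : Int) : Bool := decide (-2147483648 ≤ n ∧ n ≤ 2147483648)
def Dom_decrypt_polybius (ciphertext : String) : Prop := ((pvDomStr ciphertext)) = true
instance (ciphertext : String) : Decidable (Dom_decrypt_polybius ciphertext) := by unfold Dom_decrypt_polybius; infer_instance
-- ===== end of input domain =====

-- B replaces A's build-dict / reverse-dict / slice-and-look-up pipeline by a single
-- character-at-a-time automaton carrying a pending row value, emitting letters by
-- arithmetic indexing; objective: alternative (no tables, no slices).

-- ===== PORT A =====
-- create_polybius_square(): nested loops over range(5) inserting alphabet[i*5+j] -> f"{i+1}{j+1}"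
def pvPolySquare : PySem.Dict String String :=
  (PySem.List.pyRange 0 5 1).foldl (fun sq i =>
    (PySem.List.pyRange 0 5 1).foldl (fun sq j =>
      sq.insert
        (match PySem.Str.pyGet? "ABCDEFGHIKLMNOPQRSTUVWXYZ" (i * 5 + j) with
         | some c => String.ofList [c]
         | none => "")   -- the index i*5+j is always in range here, so "" never occurs
        (PySem.Int.toStr (i + 1) ++ PySem.Int.toStr (j + 1))) sq)
    PySem.Dict.empty

-- reverse_square = {v: k for k, v in square.items()}
def pvRevSquare : PySem.Dict String String :=
  pvPolySquare.items.foldl (fun d p => d.insert p.2 p.1) PySem.Dict.empty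

def decrypt_polybius (ciphertext : String) : String :=
  (PySem.List.pyRange 0 (PySem.Str.len ciphertext) 2).foldl
    (fun plaintext i =>
      let pair := PySem.Str.slice ciphertext (some i) (some (i + 2))
      if pvRevSquare.contains pair then plaintext ++ pvRevSquare.getD pair "" else plaintext)
    ""

-- ===== PORT B =====
-- the loop body of Source B: state = (out, pending, row); d = ord(ch) - 49
def pvStep (st : List Char × Bool × Int) (ch : Char) : List Char × Bool × Int :=
  let d : Int := (ch.toNat : Int) - 49
  if st.2.1 = false then
    (st.1, true, d)
  else
    ((if 0 ≤ st.2.2 ∧ st.2.2 ≤ 4 ∧ 0 ≤ d ∧ d ≤ 4 then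
        st.1 ++ (match PySem.Str.pyGet? "ABCDEFGHIKLMNOPQRSTUVWXYZ" (st.2.2 * 5 + d) with
                 | some c => [c]
                 | none => [])   -- the guard keeps the index within 0..24, so none never occurs
      else st.1), false, st.2.2)

def decrypt_polybius_alt (ciphertext : String) : String :=
  String.ofList (ciphertext.toList.foldl pvStep ([], false, 0)).1

-- ===== PRECONDITION & SPEC =====
def Spec_decrypt_polybius (ciphertext : String) (out : String) : Prop := out = decrypt_polybius_alt ciphertext
instance (ciphertext : String) (out : String) : Decidable (Spec_decrypt_polybius ciphertext out) := by unfold Spec_decrypt_polybius; infer_instance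

-- ===== CLAIM (what is proved, stated in full; the proofs are below) =====
def Claim_equal_decrypt_polybius : Prop := ∀ (ciphertext : String), Dom_decrypt_polybius ciphertext → Spec_decrypt_polybius ciphertext (decrypt_polybius ciphertext)

-- ===== LEMMAS AND PROOFS =====

set_option maxRecDepth 10000

-- proof-only helper: disjoint pairs, giving the two-at-a-time induction principle
def pvPairs {α : Type} : List α → List (α × α)
  | a :: b :: r => (a, b) :: pvPairs r
  | _ => []

-- A's reverse square, evaluated once and for all
lemma pvRevSquare_items : pvRevSquare.items =
    [("11", "A"), ("12", "B"), ("13", "C"), ("14", "D"), ("15", "E"),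
     ("21", "F"), ("22", "G"), ("23", "H"), ("24", "I"), ("25", "K"),
     ("31", "L"), ("32", "M"), ("33", "N"), ("34", "O"), ("35", "P"),
     ("41", "Q"), ("42", "R"), ("43", "S"), ("44", "T"), ("45", "U"),
     ("51", "V"), ("52", "W"), ("53", "X"), ("54", "Y"), ("55", "Z")] := by decide

-- B's digit test 0 ≤ ord(c)-49 ≤ 4 is A's membership range '1' ≤ c ≤ '5'
lemma pvGuard_iff (c : Char) :
    (0 ≤ (c.toNat : Int) - 49 ∧ (c.toNat : Int) - 49 ≤ 4) ↔ ('1' ≤ c ∧ c ≤ '5') := by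
  have h : ('1' ≤ c ∧ c ≤ '5') ↔ (49 ≤ c.toNat ∧ c.toNat ≤ 53) := by
    constructor
    · rintro ⟨h1, h2⟩
      simp only [Char.le_def] at h1 h2
      exact ⟨h1, h2⟩
    · rintro ⟨h1, h2⟩
      simp only [Char.le_def]
      exact ⟨h1, h2⟩
  rw [h]
  omega

lemma pvDigit_cases (a : Char) (h1 : '1' ≤ a) (h2 : a ≤ '5') :
    a = '1' ∨ a = '2' ∨ a = '3' ∨ a = '4' ∨ a = '5' := by
  simp only [Char.le_def] at h1 h2
  have h3 : 49 ≤ a.val.toNat := h1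
  have h4 : a.val.toNat ≤ 53 := h2
  have e1 : ('1' : Char).val.toNat = 49 := rfl
  have e2 : ('2' : Char).val.toNat = 50 := rfl
  have e3 : ('3' : Char).val.toNat = 51 := rfl
  have e4 : ('4' : Char).val.toNat = 52 := rfl
  have e5 : ('5' : Char).val.toNat = 53 := rfl
  simp only [Char.ext_iff, ← UInt32.toNat_inj, e1, e2, e3, e4, e5]
  omega

-- on a digit pair, A's reverse lookup is exactly B's arithmetic indexing
lemma pvLookup_hit (a b : Char) (ha : a = '1' ∨ a = '2' ∨ a = '3' ∨ a = '4' ∨ a = '5')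
    (hb : b = '1' ∨ b = '2' ∨ b = '3' ∨ b = '4' ∨ b = '5') :
    pvRevSquare.contains (String.ofList [a, b]) = true ∧
    pvRevSquare.getD (String.ofList [a, b]) "" =
      String.ofList (match PySem.Str.pyGet? "ABCDEFGHIKLMNOPQRSTUVWXYZ"
          (((a.toNat : Int) - 49) * 5 + ((b.toNat : Int) - 49)) with
        | some c => [c]
        | none => []) := by
  rcases ha with rfl|rfl|rfl|rfl|rfl <;> rcases hb with rfl|rfl|rfl|rfl|rfl <;>
    rw [PySem.Dict.contains, PySem.Dict.getD, PySem.Dict.get?, pvRevSquare_items] <;>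
    exact ⟨by decide, by decide⟩

lemma pvLookup_miss (a b : Char) (h : ¬(('1' ≤ a ∧ a ≤ '5') ∧ ('1' ≤ b ∧ b ≤ '5'))) :
    pvRevSquare.contains (String.ofList [a, b]) = false := by
  rw [PySem.Dict.contains, pvRevSquare_items]
  simp only [List.any_eq_false]
  intro p hp
  fin_cases hp <;>
  · simp [String.ext_iff]
    rintro rfl rfl
    exact h (by decide)

lemma pvLookup_single (c : Char) : pvRevSquare.contains (String.ofList [c]) = false := by
  simp [PySem.Dict.contains, pvRevSquare_items, String.ext_iff]

lemma pvRange_two (n : Nat) :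
    PySem.List.pyRange 0 ((n : Int) + 2) 2 = 0 :: (PySem.List.pyRange 0 (n : Int) 2).map (· + 2) := by
  rw [PySem.List.pyRange_of_pos _ _ (by omega : (0:Int) < 2),
      PySem.List.pyRange_of_pos _ _ (by omega : (0:Int) < 2)]
  rw [if_pos (by omega : (0:Int) < (n:Int) + 2)]
  by_cases hn : (0:Int) < (n:Int)
  · rw [if_pos hn]
    have hc : (((n : Int) + 2 - 0 + 2 - 1) / 2).toNat = (((n : Int) - 0 + 2 - 1) / 2).toNat + 1 := by
      omega
    rw [hc, List.range_succ_eq_map]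
    simp only [List.map_cons, List.map_map]
    constructor
  · rw [if_neg hn]
    have hn0 : n = 0 := by omega
    subst hn0
    norm_num

lemma pvOfList_append (l1 l2 : List Char) :
    String.ofList l1 ++ String.ofList l2 = String.ofList (l1 ++ l2) := by
  simp

-- A's stride-2 index loop computes B's character automaton, for any starting state
lemma pvLoop_eq (cs : List Char) (acc : List Char) (r0 : Int) :
    (PySem.List.pyRange 0 (cs.length : Int) 2).foldl
      (fun plaintext i =>
        let pair := String.ofList (PySem.List.slice cs (some i) (some (i + 2)))
        if pvRevSquare.contains pair then plaintext ++ pvRevSquare.getD pair "" else plaintext)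
      (String.ofList acc)
    = String.ofList (cs.foldl pvStep (acc, false, r0)).1 := by
  induction cs using pvPairs.induct generalizing acc r0 with
  | case1 a b r ih =>
    have hlen : ((a :: b :: r).length : Int) = (r.length : Int) + 2 := by simp; omega
    rw [hlen, pvRange_two, List.foldl_cons, List.foldl_map]
    rw [PySem.List.foldl_congr_mem _ _
      (fun plaintext i =>
        let pair := String.ofList (PySem.List.slice r (some i) (some (i + 2)))
        if pvRevSquare.contains pair then plaintext ++ pvRevSquare.getD pair "" else plaintext) _
      (by
        intro pl i hi
        have hi0 : 0 ≤ i := ((PySem.List.mem_pyRange_iff_of_pos (by omega) i).mp hi).1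
        have hsl : PySem.List.slice (a :: b :: r) (some (i + 2)) (some (i + 2 + 2)) =
            PySem.List.slice r (some i) (some (i + 2)) := by
          rw [PySem.List.slice_toNat _ (by omega) (by omega),
              PySem.List.slice_toNat _ (by omega) (by omega)]
          have h1 : (i + 2).toNat = i.toNat + 2 := by omega
          have h2 : (i + 2 + 2).toNat = i.toNat + 4 := by omega
          rw [h1, h2]
          simp [List.drop_succ_cons]
        simp only [hsl])]
    -- B side: run the automaton over the first two characters
    have hB : (a :: b :: r).foldl pvStep (acc, false, r0)
        = r.foldl pvStep
            ((if 0 ≤ ((a.toNat : Int) - 49) ∧ ((a.toNat : Int) - 49) ≤ 4 ∧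
                 0 ≤ ((b.toNat : Int) - 49) ∧ ((b.toNat : Int) - 49) ≤ 4 then
                acc ++ (match PySem.Str.pyGet? "ABCDEFGHIKLMNOPQRSTUVWXYZ"
                    (((a.toNat : Int) - 49) * 5 + ((b.toNat : Int) - 49)) with
                  | some c => [c]
                  | none => [])
              else acc), false, (a.toNat : Int) - 49) := by
      simp [pvStep]
    rw [hB]
    -- A side: the first iteration handles the pair (a, b)
    have hsl0 : PySem.List.slice (a :: b :: r) (some 0) (some (0 + 2)) = [a, b] := by
      rw [PySem.List.slice_toNat _ (by omega) (by omega)]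
      simp
    simp only [hsl0]
    by_cases hd : ('1' ≤ a ∧ a ≤ '5') ∧ ('1' ≤ b ∧ b ≤ '5')
    · obtain ⟨⟨ha1, ha2⟩, hb1, hb2⟩ := hd
      obtain ⟨hc, hv⟩ := pvLookup_hit a b (pvDigit_cases a ha1 ha2) (pvDigit_cases b hb1 hb2)
      simp only [hc, if_true, hv]
      have hg : (0 ≤ ((a.toNat : Int) - 49) ∧ ((a.toNat : Int) - 49) ≤ 4 ∧
          0 ≤ ((b.toNat : Int) - 49) ∧ ((b.toNat : Int) - 49) ≤ 4) := by
        obtain ⟨x1, x2⟩ := (pvGuard_iff a).mpr ⟨ha1, ha2⟩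
        obtain ⟨y1, y2⟩ := (pvGuard_iff b).mpr ⟨hb1, hb2⟩
        exact ⟨x1, x2, y1, y2⟩
      rw [if_pos hg, pvOfList_append]
      exact ih _ _
    · have hc := pvLookup_miss a b hd
      simp only [hc, if_false, Bool.false_eq_true]
      have hg : ¬(0 ≤ ((a.toNat : Int) - 49) ∧ ((a.toNat : Int) - 49) ≤ 4 ∧
          0 ≤ ((b.toNat : Int) - 49) ∧ ((b.toNat : Int) - 49) ≤ 4) := by
        intro ⟨x1, x2, y1, y2⟩
        exact hd ⟨(pvGuard_iff a).mp ⟨x1, x2⟩, (pvGuard_iff b).mp ⟨y1, y2⟩⟩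
      rw [if_neg hg]
      exact ih _ _
  | case2 t ht =>
    match t, ht with
    | [], _ =>
      simp [PySem.List.pyRange_of_pos 0 0 (by omega : (0:Int) < 2)]
    | [c], _ =>
      have h0 : ((([c] : List Char).length : Nat) : Int) = 1 := by simp
      rw [h0]
      have h1 : PySem.List.pyRange 0 (1 : Int) 2 = [0] := by decide
      rw [h1, List.foldl_cons, List.foldl_nil]
      have hsl : PySem.List.slice [c] (some 0) (some (0 + 2)) = [c] := by
        rw [PySem.List.slice_toNat _ (by omega) (by omega)]; simp
      simp only [hsl, pvLookup_single c, if_false, Bool.false_eq_true]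
      simp [pvStep]
    | a :: b :: r, ht => exact absurd rfl (ht a b r)

-- ===== VERDICT (by name: the statement is the Claim_ definition above) =====
theorem decrypt_polybius_spec : Claim_equal_decrypt_polybius := by
  intro s _
  unfold Spec_decrypt_polybius decrypt_polybius decrypt_polybius_alt
  have hfun : (fun (plaintext : String) (i : Int) =>
      let pair := PySem.Str.slice s (some i) (some (i + 2))
      if pvRevSquare.contains pair then plaintext ++ pvRevSquare.getD pair "" else plaintext)
    = (fun (plaintext : String) (i : Int) =>
      let pair := String.ofList (PySem.List.slice s.toList (some i) (some (i + 2)))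
      if pvRevSquare.contains pair then plaintext ++ pvRevSquare.getD pair "" else plaintext) := by
    funext pl i
    have hs : PySem.Str.slice s (some i) (some (i + 2))
        = String.ofList (PySem.List.slice s.toList (some i) (some (i + 2))) := by
      apply String.ext
      simp [PySem.Str.toList_slice]
    simp only [hs]
  have hlen : PySem.Str.len s = (s.toList.length : Int) := by simp
  rw [hlen, hfun]
  have h := pvLoop_eq s.toList [] 0
  simpa using h
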